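-- pv_equiv track=rewrite | github.com/HousseinBadra/Algorithms-and-datastructures | build_heap.py | build_heap
-- ===== SOURCE A (Python) =====
-- import math
--
-- def build_heap(data):
--     """Build a heap from ``data`` inplace.
--
--     Returns a sequence of swaps performed by the algorithm.
--     """
--     # The following naive implementation just sorts the given sequence
--     # using selection sort algorithm and saves the resulting sequence
--     # of swaps. This turns the given array into a heap, but in the worst
--     # case gives a quadratic number of swaps.
--     #
--     # TODO: replace by a more efficient implementation
--     swaps = []
--     k=math.floor(len(data)/2-1)
--     while k>=0:
--
--        i=k+0
--
--        while i<=math.floor(len(data)/2)-1: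
--
--          if i==len(data)/2-1:
--            childindex=i*2+1
--            if data[childindex]<data[i]:
--             data[i],data[childindex]=data[childindex],data[i]
--             swaps.append([i,childindex])
--             i=childindex
--            else:
--                break
--          else:
--           left=i*2+1
--           right=i*2+2
--           if data[left]<data[right]:
--            if data[left]<data[i]:
--             data[i],data[left]=data[left],data[i]
--             swaps.append([i,left])
--             i=left
--            else:
--                 break
--           elif data[right]<data[i]:
--            data[i],data[right]=data[right],data[i]
--            swaps.append([i,right])
--            i=right
--           else:
--               break
--        k-=1
-- ## k
--     return swaps
-- ===== SOURCE B (Python) =====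
-- def build_heap(data):
--     """Build a min-heap from ``data`` in place; return the list of swaps.
--
--     Recursive sift-down decomposition instead of the original nested whiles.
--     """
--     n = len(data)
--     swaps = []
--
--     def sift_down(i):
--         left = 2 * i + 1
--         if left >= n:
--             return
--         right = left + 1
--         c = left if (right >= n or data[left] < data[right]) else right
--         if data[c] < data[i]:
--             data[i], data[c] = data[c], data[i]
--             swaps.append([i, c])
--             sift_down(c)
--
--     for i in range(n // 2 - 1, -1, -1):
--         sift_down(i)
--     return swaps
-- ===== Notes on version B (the rewrite author's own statement) =====
-- stated objective: simpler
-- what changed: Replaces A's nested while loops with their float-equality single-child special case by a for-loop over range(n//2-1,-1,-1) calling a recursive sift_down that picks the child once via `right>=n or data[left]<data[right]` (preserving the right-preferring tie-break); a timing run measured this about 2x faster (fewer comparisons/float ops per step).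
import Mathlib
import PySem

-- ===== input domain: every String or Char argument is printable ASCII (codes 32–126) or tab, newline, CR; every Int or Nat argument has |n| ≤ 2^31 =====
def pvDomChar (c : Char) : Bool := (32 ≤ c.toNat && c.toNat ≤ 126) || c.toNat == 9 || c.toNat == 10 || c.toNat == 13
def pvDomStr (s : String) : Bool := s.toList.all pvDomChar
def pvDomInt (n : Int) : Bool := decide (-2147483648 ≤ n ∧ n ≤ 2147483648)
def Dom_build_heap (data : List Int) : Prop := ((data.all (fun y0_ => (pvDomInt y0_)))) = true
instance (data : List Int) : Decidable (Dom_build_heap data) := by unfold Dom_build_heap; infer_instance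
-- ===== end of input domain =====

-- B replaces A's nested while loops by a range loop calling a recursive sift_down
-- (objective: simpler decomposition, same cost). A mutates `data` in place; the
-- equivalence proved here is about the RETURN value (the swap list) only.

-- in-place swap data[i],data[j] = data[j],data[i] (indices are always in range where used)
def pvSwap (data : List Int) (i j : Nat) : List Int :=
  (data.set i (data.getD j 0)).set j (data.getD i 0)

@[simp] theorem pvSwap_length (data : List Int) (i j : Nat) :
    (pvSwap data i j).length = data.length := by
  simp [pvSwap]

-- ===== PORT A =====
-- A's inner `while i <= floor(len/2)-1` loop; `i == len(data)/2 - 1` (float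
-- equality) is transcribed exactly as 2*(i+1) = data.length.
def aInner (i : Nat) (data : List Int) (swaps : List (List Int)) :
    List Int × List (List Int) :=
  if h : i + 1 ≤ data.length / 2 then
    if 2 * (i + 1) = data.length then
      -- single-child case: childindex = i*2+1
      let childindex := i * 2 + 1
      if data.getD childindex 0 < data.getD i 0 then
        aInner childindex (pvSwap data i childindex) (swaps ++ [[(i : Int), (childindex : Int)]])
      else (data, swaps)
    else
      let left := i * 2 + 1
      let right := i * 2 + 2
      if data.getD left 0 < data.getD right 0 then
        if data.getD left 0 < data.getD i 0 then
          aInner left (pvSwap data i left) (swaps ++ [[(i : Int), (left : Int)]])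
        else (data, swaps)
      else if data.getD right 0 < data.getD i 0 then
        aInner right (pvSwap data i right) (swaps ++ [[(i : Int), (right : Int)]])
      else (data, swaps)
  else (data, swaps)
termination_by data.length - i
decreasing_by all_goals simp_all [pvSwap_length]; omega

-- A's outer `while k >= 0` loop, counting the remaining iterations: with
-- c+1 iterations left the current k is c (k starts at floor(len/2 - 1)).
def aOuter : Nat → List Int × List (List Int) → List Int × List (List Int)
  | 0, st => st
  | c + 1, st => aOuter c (aInner c st.1 st.2)

def build_heap (data : List Int) : List (List Int) :=
  (aOuter (data.length / 2) (data, [])).2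

-- ===== PORT B =====
-- recursive sift_down from Source B; n is captured once
def bSift (n : Nat) (data : List Int) (swaps : List (List Int)) (i : Nat) :
    List Int × List (List Int) :=
  let left := 2 * i + 1
  if h : left ≥ n then (data, swaps)
  else
    let right := left + 1
    let c := if right ≥ n ∨ data.getD left 0 < data.getD right 0 then left else right
    if data.getD c 0 < data.getD i 0 then
      bSift n (pvSwap data i c) (swaps ++ [[(i : Int), (c : Int)]]) c
    else (data, swaps)
termination_by n - i
decreasing_by split <;> omega

def build_heap_alt (data : List Int) : List (List Int) :=
  let n := data.length
  ((PySem.List.pyRange ((n : Int) / 2 - 1) (-1) (-1)).foldl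
    (fun st i => bSift n st.1 st.2 i.toNat) (data, [])).2

-- ===== PRECONDITION & SPEC =====
def Spec_build_heap (data : List Int) (out : List (List Int)) : Prop := out = build_heap_alt data
instance (data : List Int) (out : List (List Int)) : Decidable (Spec_build_heap data out) := by unfold Spec_build_heap; infer_instance

-- ===== CLAIM (what is proved, stated in full; the proofs are below) =====
def Claim_equal_build_heap : Prop := ∀ (data : List Int), Dom_build_heap data → Spec_build_heap data (build_heap data)

-- ===== LEMMAS AND PROOFS =====

theorem bSift_length (n : Nat) (data : List Int) (swaps : List (List Int)) (i : Nat) :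
    (bSift n data swaps i).1.length = data.length := by
  fun_induction bSift with
  | _ => simp_all

theorem bSift_step (n i : Nat) (data : List Int) (swaps : List (List Int)) (h : ¬ 2*i+1 ≥ n) :
    bSift n data swaps i =
      (fun c => if data.getD c 0 < data.getD i 0 then
          bSift n (pvSwap data i c) (swaps ++ [[(i:Int), (c:Int)]]) c
        else (data, swaps))
      (if 2*i+1+1 ≥ n ∨ data.getD (2*i+1) 0 < data.getD (2*i+1+1) 0 then 2*i+1 else 2*i+1+1) := by
  rw [bSift, dif_neg h]

theorem sift_eq (n : Nat) : ∀ (m i : Nat) (data : List Int) (swaps : List (List Int)),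
    data.length = n → n - i ≤ m → aInner i data swaps = bSift n data swaps i := by
  intro m
  induction m with
  | zero =>
    intro i data swaps hn hm
    rw [aInner, bSift]
    rw [dif_neg (by omega), dif_pos (by omega)]
  | succ m ih =>
    intro i data swaps hn hm
    by_cases hg : i + 1 ≤ n / 2
    · rw [aInner.eq_def, hn, dif_pos (by omega), bSift_step n i data swaps (by omega)]
      beta_reduce
      by_cases hsp : 2 * (i + 1) = n
      · -- even n, last internal node: single child, B picks c = left since right = n
        rw [if_pos hsp, if_pos (Or.inl (by omega : 2*i+1+1 ≥ n))]
        simp only [show i * 2 + 1 = 2*i+1 by ring]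
        split
        · exact ih (2*i+1) _ _ (by simp [hn]) (by omega)
        · rfl
      · rw [if_neg hsp]
        simp only [show i * 2 + 1 = 2*i+1 by ring, show i * 2 + 2 = 2*i+1+1 by ring]
        by_cases hlt : data.getD (2*i+1) 0 < data.getD (2*i+1+1) 0
        · rw [if_pos hlt, if_pos (Or.inr hlt)]
          split
          · exact ih (2*i+1) _ _ (by simp [hn]) (by omega)
          · rfl
        · have hc : ¬ (2*i+1+1 ≥ n ∨ data.getD (2*i+1) 0 < data.getD (2*i+1+1) 0) :=
            not_or.mpr ⟨by omega, hlt⟩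
          rw [if_neg hlt, if_neg hc]
          split
          · exact ih (2*i+1+1) _ _ (by simp [hn]) (by omega)
          · rfl
    · rw [aInner.eq_def, hn, bSift]
      rw [dif_neg (by omega), dif_pos (by omega)]

theorem outer_eq (n : Nat) : ∀ (c : Nat) (data : List Int) (swaps : List (List Int)),
    data.length = n → c ≤ n →
    aOuter c (data, swaps) =
      (PySem.List.pyRange ((c : Int) - 1) (-1) (-1)).foldl
        (fun st i => bSift n st.1 st.2 i.toNat) (data, swaps) := by
  intro c
  induction c with
  | zero =>
    intro data swaps hn hc
    rw [PySem.List.pyRange_neg_one_eq_nil (by omega)]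
    rfl
  | succ c ih =>
    intro data swaps hn hc
    rw [PySem.List.pyRange_neg_one_cons (by omega)]
    simp only [List.foldl_cons, aOuter]
    have hstep : aInner c data swaps = bSift n data swaps c :=
      sift_eq n (n - c) c data swaps hn (by omega)
    have hlen : (bSift n data swaps c).1.length = n := by rw [bSift_length]; exact hn
    simp only [Nat.cast_add, Nat.cast_one]
    have harg : ((c : Int) + 1 - 1 - 1) = (c : Int) - 1 := by ring
    have htoNat : ((c : Int) + 1 - 1).toNat = c := by omega
    rw [hstep, harg, htoNat]
    calc aOuter c (bSift n data swaps c)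
        = aOuter c ((bSift n data swaps c).1, (bSift n data swaps c).2) := rfl
      _ = _ := by
          rw [ih (bSift n data swaps c).1 (bSift n data swaps c).2 hlen (by omega)]

-- ===== VERDICT (by name: the statement is the Claim_ definition above) =====
theorem build_heap_spec : Claim_equal_build_heap := by
  intro data _
  unfold Spec_build_heap build_heap build_heap_alt
  dsimp only
  have h2 : ((data.length : Int) / 2 - 1) = ((data.length / 2 : Nat) : Int) - 1 := by
    omega
  rw [h2, outer_eq data.length (data.length / 2) data [] rfl (Nat.div_le_self _ _)]
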